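-- pv_equiv track=rewrite | github.com/ankitkpro/metrics-generation-dashboard | app.py | shot_direction_metrics
-- ===== SOURCE A (Python) =====
-- def shot_direction_metrics(shot_direction_angles, batter_hand):
--     """Convert shot direction angles to direction names"""
--     lefty = batter_hand == 'Left'
--
--     righty_angles = [
--         ((60, 80), "Mid On"),
--         ((100, 110), "Mid Off"),
--         ((110, 150), "Cover"),
--         ((80, 100), "Straight"),
--         ((30, 60), "Mid Wicket"),
--         ((0, 30), "Square Leg"),
--         ((150, 180), "Point"),
--     ]
--
--     lefty_angles = [
--         ((70, 80), "Mid Off"),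
--         ((100, 120), "Mid On"),
--         ((30, 70), "Cover"),
--         ((80, 100), "Straight"),
--         ((0, 30), "Point"),
--         ((120, 150), "Mid Wicket"),
--         ((150, 180), "Square Leg"),
--     ]
--
--     angles = lefty_angles if lefty else righty_angles
--
--     shot_directions = []
--     for i in range(len(shot_direction_angles)):
--         shot_direction_angle_degrees = shot_direction_angles[i]
--         if shot_direction_angle_degrees <= 0 or shot_direction_angle_degrees >= 180:
--             shot_directions.append('Behind the Wicket')
--         else:
--             found = False
--             for (low, high), shot_direction in angles:
--                 if low < shot_direction_angle_degrees <= high: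
--                     shot_directions.append(shot_direction)
--                     found = True
--                     break
--             if not found:
--                 shot_directions.append('Behind the Wicket')
--
--     return shot_directions
-- ===== SOURCE B (Python) =====
-- def _bisect_left(a, x):
--     lo, hi = 0, len(a)
--     while lo < hi:
--         mid = (lo + hi) // 2
--         if a[mid] < x:
--             lo = mid + 1
--         else:
--             hi = mid
--     return lo
--
--
-- def shot_direction_metrics(shot_direction_angles, batter_hand):
--     """Convert shot direction angles to direction names"""
--     if batter_hand == 'Left':
--         bounds = [30, 70, 80, 100, 120, 150, 180]
--         names = ["Point", "Cover", "Mid Off", "Straight", "Mid On", "Mid Wicket", "Square Leg"]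
--     else:
--         bounds = [30, 60, 80, 100, 110, 150, 180]
--         names = ["Square Leg", "Mid Wicket", "Mid On", "Straight", "Mid Off", "Cover", "Point"]
--     return ['Behind the Wicket' if a <= 0 or a >= 180 else names[_bisect_left(bounds, a)]
--             for a in shot_direction_angles]
-- ===== Notes on version B (the rewrite author's own statement) =====
-- stated objective: alternative
-- what changed: Replaces the per-angle linear scan over an unsorted interval table by two prebuilt sorted upper-bound/name arrays per hand, indexed via a hand-written bisect_left binary search inside a list comprehension.
import Mathlib
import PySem

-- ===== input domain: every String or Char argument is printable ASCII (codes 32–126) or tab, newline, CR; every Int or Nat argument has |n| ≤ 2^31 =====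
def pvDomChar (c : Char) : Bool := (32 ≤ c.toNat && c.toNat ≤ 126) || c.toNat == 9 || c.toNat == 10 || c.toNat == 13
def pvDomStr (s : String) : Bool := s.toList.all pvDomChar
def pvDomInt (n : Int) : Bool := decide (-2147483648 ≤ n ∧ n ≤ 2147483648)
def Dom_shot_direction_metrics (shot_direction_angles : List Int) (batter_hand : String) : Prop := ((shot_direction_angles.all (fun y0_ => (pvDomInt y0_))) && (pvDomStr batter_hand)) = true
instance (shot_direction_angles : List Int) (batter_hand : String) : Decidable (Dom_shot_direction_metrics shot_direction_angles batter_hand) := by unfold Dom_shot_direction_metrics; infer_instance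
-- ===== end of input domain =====

-- B replaces A's per-angle linear scan over an unsorted interval table by a prebuilt
-- sorted upper-bound array + parallel name array per hand, looked up via binary search
-- (bisect_left); objective: idiomatic/alternative, same behaviour.


-- ===== PORT A =====
-- the inner 'for (low, high), shot_direction in angles: … break' with its found flag,
-- as a first-match scan returning none when no interval matched
def pvScanA (angles : List ((Int × Int) × String)) (x : Int) : Option String :=
  match angles with
  | [] => none
  | ((low, high), name) :: rest =>
      if low < x ∧ x ≤ high then some name else pvScanA rest x

def shot_direction_metrics (shot_direction_angles : List Int) (batter_hand : String) : List String :=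
  let lefty := batter_hand == "Left"
  let righty_angles : List ((Int × Int) × String) :=
    [((60, 80), "Mid On"), ((100, 110), "Mid Off"), ((110, 150), "Cover"),
     ((80, 100), "Straight"), ((30, 60), "Mid Wicket"), ((0, 30), "Square Leg"),
     ((150, 180), "Point")]
  let lefty_angles : List ((Int × Int) × String) :=
    [((70, 80), "Mid Off"), ((100, 120), "Mid On"), ((30, 70), "Cover"),
     ((80, 100), "Straight"), ((0, 30), "Point"), ((120, 150), "Mid Wicket"),
     ((150, 180), "Square Leg")]
  let angles := if lefty then lefty_angles else righty_angles
  -- 'for i in range(len(..)): x = xs[i]; … append' iterates the list in order appending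
  shot_direction_angles.foldl
    (fun shot_directions x =>
      if x ≤ 0 ∨ x ≥ 180 then shot_directions ++ ["Behind the Wicket"]
      else
        match pvScanA angles x with
        | some name => shot_directions ++ [name]
        | none => shot_directions ++ ["Behind the Wicket"]) []

-- ===== PORT B =====
-- B's hand-written _bisect_left (while lo < hi binary search); the fuel argument only
-- bounds the loop (hi - lo shrinks every step, so fuel = len(a) is never exhausted)
def pvBisectGo (fuel : Nat) (a : List Int) (x : Int) (lo hi : Nat) : Nat :=
  match fuel with
  | 0 => lo
  | fuel + 1 =>
    if lo < hi then
      let mid := (lo + hi) / 2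
      if a.getD mid 0 < x then pvBisectGo fuel a x (mid + 1) hi else pvBisectGo fuel a x lo mid
    else lo

def pvBisectLeft (a : List Int) (x : Int) : Nat := pvBisectGo a.length a x 0 a.length

def shot_direction_metrics_alt (shot_direction_angles : List Int) (batter_hand : String) : List String :=
  let tbl : List Int × List String :=
    if batter_hand == "Left" then
      ([30, 70, 80, 100, 120, 150, 180],
       ["Point", "Cover", "Mid Off", "Straight", "Mid On", "Mid Wicket", "Square Leg"])
    else
      ([30, 60, 80, 100, 110, 150, 180],
       ["Square Leg", "Mid Wicket", "Mid On", "Straight", "Mid Off", "Cover", "Point"])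
  -- names[idx]: the index is always in range for 0 < a < 180, so getD is exact here
  shot_direction_angles.map (fun a =>
    if a ≤ 0 ∨ a ≥ 180 then "Behind the Wicket"
    else tbl.2.getD (pvBisectLeft tbl.1 a) "Behind the Wicket")

-- ===== PRECONDITION & SPEC =====
def Spec_shot_direction_metrics (shot_direction_angles : List Int) (batter_hand : String) (out : List String) : Prop := out = shot_direction_metrics_alt shot_direction_angles batter_hand
instance (shot_direction_angles : List Int) (batter_hand : String) (out : List String) : Decidable (Spec_shot_direction_metrics shot_direction_angles batter_hand out) := by unfold Spec_shot_direction_metrics; infer_instance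

-- ===== CLAIM (what is proved, stated in full; the proofs are below) =====
def Claim_equal_shot_direction_metrics : Prop := ∀ (shot_direction_angles : List Int) (batter_hand : String), Dom_shot_direction_metrics shot_direction_angles batter_hand → Spec_shot_direction_metrics shot_direction_angles batter_hand (shot_direction_metrics shot_direction_angles batter_hand)

-- ===== LEMMAS AND PROOFS =====

-- proof-only helpers: per-element value of A's loop body and B's map body
def pvElemA (angles : List ((Int × Int) × String)) (x : Int) : String :=
  if x ≤ 0 ∨ x ≥ 180 then "Behind the Wicket"
  else
    match pvScanA angles x with
    | some name => name
    | none => "Behind the Wicket"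

def pvElemB (bounds : List Int) (names : List String) (x : Int) : String :=
  if x ≤ 0 ∨ x ≥ 180 then "Behind the Wicket"
  else names.getD (pvBisectLeft bounds x) "Behind the Wicket"

theorem foldl_append_eq_map {α β : Type} (f : α → β) (xs : List α) (acc : List β) :
    xs.foldl (fun r x => r ++ [f x]) acc = acc ++ xs.map f := by
  induction xs generalizing acc with
  | nil => simp
  | cons y ys ih => simp [List.foldl, ih]

theorem bodyA_eq (angles : List ((Int × Int) × String)) :
    (fun (shot_directions : List String) (x : Int) =>
      if x ≤ 0 ∨ x ≥ 180 then shot_directions ++ ["Behind the Wicket"]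
      else
        match pvScanA angles x with
        | some name => shot_directions ++ [name]
        | none => shot_directions ++ ["Behind the Wicket"])
    = fun r x => r ++ [pvElemA angles x] := by
  funext r x
  unfold pvElemA
  split_ifs with h
  · rfl
  · cases pvScanA angles x <;> rfl

-- one unfolding step / base case of the binary search, with the midpoint and probed value given
theorem pvGoStep (f : Nat) (a : List Int) (x : Int) (lo hi mid : Nat) (v : Int) (h : lo < hi)
    (hm : (lo + hi) / 2 = mid) (hv : a.getD mid 0 = v) :
    pvBisectGo (f + 1) a x lo hi
      = if v < x then pvBisectGo f a x (mid + 1) hi else pvBisectGo f a x lo mid := by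
  simp only [pvBisectGo, if_pos h, hm, hv]

theorem pvGoBase (f : Nat) (a : List Int) (x : Int) (lo hi : Nat) (h : ¬ lo < hi) :
    pvBisectGo (f + 1) a x lo hi = lo := by
  simp only [pvBisectGo, if_neg h]

theorem bisect_righty (x : Int) (h0 : 0 < x) (h1 : x < 180) :
    pvBisectGo 7 [30, 60, 80, 100, 110, 150, 180] x 0 7 = (if x ≤ 30 then 0 else if x ≤ 60 then 1 else if x ≤ 80 then 2 else if x ≤ 100 then 3 else if x ≤ 110 then 4 else if x ≤ 150 then 5 else 6) := by
  split_ifs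
  · rw [pvGoStep 6 _ x 0 7 3 100 (by norm_num) rfl rfl, if_neg (by omega),
        pvGoStep 5 _ x 0 3 1 60 (by norm_num) rfl rfl, if_neg (by omega),
        pvGoStep 4 _ x 0 1 0 30 (by norm_num) rfl rfl, if_neg (by omega),
        pvGoBase 3 _ x 0 0 (by norm_num)]
  · rw [pvGoStep 6 _ x 0 7 3 100 (by norm_num) rfl rfl, if_neg (by omega),
        pvGoStep 5 _ x 0 3 1 60 (by norm_num) rfl rfl, if_neg (by omega),
        pvGoStep 4 _ x 0 1 0 30 (by norm_num) rfl rfl, if_pos (by omega),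
        pvGoBase 3 _ x 1 1 (by norm_num)]
  · rw [pvGoStep 6 _ x 0 7 3 100 (by norm_num) rfl rfl, if_neg (by omega),
        pvGoStep 5 _ x 0 3 1 60 (by norm_num) rfl rfl, if_pos (by omega),
        pvGoStep 4 _ x 2 3 2 80 (by norm_num) rfl rfl, if_neg (by omega),
        pvGoBase 3 _ x 2 2 (by norm_num)]
  · rw [pvGoStep 6 _ x 0 7 3 100 (by norm_num) rfl rfl, if_neg (by omega),
        pvGoStep 5 _ x 0 3 1 60 (by norm_num) rfl rfl, if_pos (by omega),
        pvGoStep 4 _ x 2 3 2 80 (by norm_num) rfl rfl, if_pos (by omega),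
        pvGoBase 3 _ x 3 3 (by norm_num)]
  · rw [pvGoStep 6 _ x 0 7 3 100 (by norm_num) rfl rfl, if_pos (by omega),
        pvGoStep 5 _ x 4 7 5 150 (by norm_num) rfl rfl, if_neg (by omega),
        pvGoStep 4 _ x 4 5 4 110 (by norm_num) rfl rfl, if_neg (by omega),
        pvGoBase 3 _ x 4 4 (by norm_num)]
  · rw [pvGoStep 6 _ x 0 7 3 100 (by norm_num) rfl rfl, if_pos (by omega),
        pvGoStep 5 _ x 4 7 5 150 (by norm_num) rfl rfl, if_neg (by omega),
        pvGoStep 4 _ x 4 5 4 110 (by norm_num) rfl rfl, if_pos (by omega),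
        pvGoBase 3 _ x 5 5 (by norm_num)]
  · rw [pvGoStep 6 _ x 0 7 3 100 (by norm_num) rfl rfl, if_pos (by omega),
        pvGoStep 5 _ x 4 7 5 150 (by norm_num) rfl rfl, if_pos (by omega),
        pvGoStep 4 _ x 6 7 6 180 (by norm_num) rfl rfl, if_neg (by omega),
        pvGoBase 3 _ x 6 6 (by norm_num)]

theorem bisect_lefty (x : Int) (h0 : 0 < x) (h1 : x < 180) :
    pvBisectGo 7 [30, 70, 80, 100, 120, 150, 180] x 0 7 = (if x ≤ 30 then 0 else if x ≤ 70 then 1 else if x ≤ 80 then 2 else if x ≤ 100 then 3 else if x ≤ 120 then 4 else if x ≤ 150 then 5 else 6) := by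
  split_ifs
  · rw [pvGoStep 6 _ x 0 7 3 100 (by norm_num) rfl rfl, if_neg (by omega),
        pvGoStep 5 _ x 0 3 1 70 (by norm_num) rfl rfl, if_neg (by omega),
        pvGoStep 4 _ x 0 1 0 30 (by norm_num) rfl rfl, if_neg (by omega),
        pvGoBase 3 _ x 0 0 (by norm_num)]
  · rw [pvGoStep 6 _ x 0 7 3 100 (by norm_num) rfl rfl, if_neg (by omega),
        pvGoStep 5 _ x 0 3 1 70 (by norm_num) rfl rfl, if_neg (by omega),
        pvGoStep 4 _ x 0 1 0 30 (by norm_num) rfl rfl, if_pos (by omega),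
        pvGoBase 3 _ x 1 1 (by norm_num)]
  · rw [pvGoStep 6 _ x 0 7 3 100 (by norm_num) rfl rfl, if_neg (by omega),
        pvGoStep 5 _ x 0 3 1 70 (by norm_num) rfl rfl, if_pos (by omega),
        pvGoStep 4 _ x 2 3 2 80 (by norm_num) rfl rfl, if_neg (by omega),
        pvGoBase 3 _ x 2 2 (by norm_num)]
  · rw [pvGoStep 6 _ x 0 7 3 100 (by norm_num) rfl rfl, if_neg (by omega),
        pvGoStep 5 _ x 0 3 1 70 (by norm_num) rfl rfl, if_pos (by omega),
        pvGoStep 4 _ x 2 3 2 80 (by norm_num) rfl rfl, if_pos (by omega),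
        pvGoBase 3 _ x 3 3 (by norm_num)]
  · rw [pvGoStep 6 _ x 0 7 3 100 (by norm_num) rfl rfl, if_pos (by omega),
        pvGoStep 5 _ x 4 7 5 150 (by norm_num) rfl rfl, if_neg (by omega),
        pvGoStep 4 _ x 4 5 4 120 (by norm_num) rfl rfl, if_neg (by omega),
        pvGoBase 3 _ x 4 4 (by norm_num)]
  · rw [pvGoStep 6 _ x 0 7 3 100 (by norm_num) rfl rfl, if_pos (by omega),
        pvGoStep 5 _ x 4 7 5 150 (by norm_num) rfl rfl, if_neg (by omega),
        pvGoStep 4 _ x 4 5 4 120 (by norm_num) rfl rfl, if_pos (by omega),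
        pvGoBase 3 _ x 5 5 (by norm_num)]
  · rw [pvGoStep 6 _ x 0 7 3 100 (by norm_num) rfl rfl, if_pos (by omega),
        pvGoStep 5 _ x 4 7 5 150 (by norm_num) rfl rfl, if_pos (by omega),
        pvGoStep 4 _ x 6 7 6 180 (by norm_num) rfl rfl, if_neg (by omega),
        pvGoBase 3 _ x 6 6 (by norm_num)]

theorem elem_righty (x : Int) :
    pvElemA [((60, 80), "Mid On"), ((100, 110), "Mid Off"), ((110, 150), "Cover"), ((80, 100), "Straight"), ((30, 60), "Mid Wicket"), ((0, 30), "Square Leg"), ((150, 180), "Point")] x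
    = pvElemB [30, 60, 80, 100, 110, 150, 180] ["Square Leg", "Mid Wicket", "Mid On", "Straight", "Mid Off", "Cover", "Point"] x := by
  unfold pvElemA pvElemB
  by_cases h : x ≤ 0 ∨ x ≥ 180
  · rw [if_pos h, if_pos h]
  · rw [if_neg h, if_neg h]
    rw [show pvBisectLeft [30, 60, 80, 100, 110, 150, 180] x = pvBisectGo 7 [30, 60, 80, 100, 110, 150, 180] x 0 7 from rfl]
    rw [bisect_righty x (by omega) (by omega)]
    simp only [pvScanA]
    split_ifs <;> first | rfl | omega

theorem elem_lefty (x : Int) :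
    pvElemA [((70, 80), "Mid Off"), ((100, 120), "Mid On"), ((30, 70), "Cover"), ((80, 100), "Straight"), ((0, 30), "Point"), ((120, 150), "Mid Wicket"), ((150, 180), "Square Leg")] x
    = pvElemB [30, 70, 80, 100, 120, 150, 180] ["Point", "Cover", "Mid Off", "Straight", "Mid On", "Mid Wicket", "Square Leg"] x := by
  unfold pvElemA pvElemB
  by_cases h : x ≤ 0 ∨ x ≥ 180
  · rw [if_pos h, if_pos h]
  · rw [if_neg h, if_neg h]
    rw [show pvBisectLeft [30, 70, 80, 100, 120, 150, 180] x = pvBisectGo 7 [30, 70, 80, 100, 120, 150, 180] x 0 7 from rfl]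
    rw [bisect_lefty x (by omega) (by omega)]
    simp only [pvScanA]
    split_ifs <;> first | rfl | omega

-- ===== VERDICT (by name: the statement is the Claim_ definition above) =====
theorem shot_direction_metrics_spec : Claim_equal_shot_direction_metrics := by
  intro xs hand _
  unfold Spec_shot_direction_metrics shot_direction_metrics shot_direction_metrics_alt
  by_cases hh : hand == "Left" <;>
    simp only [hh, if_true, if_false, Bool.false_eq_true, bodyA_eq, foldl_append_eq_map,
      List.nil_append] <;>
    refine List.map_congr_left (fun x _ => ?_)
  · exact elem_lefty x
  · exact elem_righty x
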